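-- pv_equiv track=rewrite | github.com/umang8496/ds-with-python | hackerrank-problems/SansaXor.py | sansaXor
-- ===== SOURCE A (Python) =====
-- def sansaXor(arr):
--     xor_result = 0
--     N = len(arr)
--
--     if(N % 2 == 0):
--         return 0
--     else:
--         for i in range(0, N, 2):
--             xor_result = xor_result ^ arr[i]
--     return xor_result
-- ===== SOURCE B (Python) =====
-- def sansaXor(arr):
--     # Each arr[i] occurs in (i+1)*(n-i) contiguous subarrays; XOR it in iff that count is odd.
--     n = len(arr)
--     result = 0
--     for i, x in enumerate(arr):
--         if ((i + 1) * (n - i)) % 2 == 1: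
--             result ^= x
--     return result
-- ===== Notes on version B (the rewrite author's own statement) =====
-- stated objective: alternative
-- what changed: B drops A's length-parity guard and even-index stride and instead XORs each element according to the parity of its subarray-occurrence count (i+1)*(n-i), the standard multiplicity argument for the SansaXor problem.
import Mathlib
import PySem

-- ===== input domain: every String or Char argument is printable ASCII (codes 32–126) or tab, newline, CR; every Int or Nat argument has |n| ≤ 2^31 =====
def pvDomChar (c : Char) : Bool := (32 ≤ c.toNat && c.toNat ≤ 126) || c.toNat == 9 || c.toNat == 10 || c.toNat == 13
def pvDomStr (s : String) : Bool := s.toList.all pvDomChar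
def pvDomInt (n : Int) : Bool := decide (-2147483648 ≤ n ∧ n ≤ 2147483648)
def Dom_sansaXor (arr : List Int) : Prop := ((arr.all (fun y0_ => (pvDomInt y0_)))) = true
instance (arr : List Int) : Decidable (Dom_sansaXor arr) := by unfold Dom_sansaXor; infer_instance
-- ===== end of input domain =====

-- B replaces A's length-parity guard + even-index stride by the subarray-multiplicity rule
-- (XOR arr[i] in iff its occurrence count (i+1)*(n-i) is odd); equal return values proved below.

-- ===== PORT A =====
def sansaXor (arr : List Int) : Int :=
  let N : Int := arr.length
  if PySem.Int.mod N 2 == 0 then 0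
  else (PySem.List.pyRange 0 N 2).foldl
    (fun xor_result i => PySem.Int.bxor xor_result (PySem.List.pyGetD arr i 0)) 0

-- ===== PORT B =====
def sansaXor_alt (arr : List Int) : Int :=
  let n : Int := arr.length
  (PySem.List.enumerate arr 0).foldl
    (fun result p =>
      if PySem.Int.mod ((p.1 + 1) * (n - p.1)) 2 == 1 then PySem.Int.bxor result p.2 else result) 0

-- ===== PRECONDITION & SPEC =====
def Spec_sansaXor (arr : List Int) (out : Int) : Prop := out = sansaXor_alt arr
instance (arr : List Int) (out : Int) : Decidable (Spec_sansaXor arr out) := by unfold Spec_sansaXor; infer_instance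

-- ===== CLAIM (what is proved, stated in full; the proofs are below) =====
def Claim_equal_sansaXor : Prop := ∀ (arr : List Int), Dom_sansaXor arr → Spec_sansaXor arr (sansaXor arr)

-- ===== LEMMAS AND PROOFS =====

-- the even-indexed elements of a list, in order
def pvEvens : List Int → List Int
  | [] => []
  | [a] => [a]
  | a :: _ :: t => a :: pvEvens t

theorem pvFmod_two_of_odd {x : Int} (h : x % 2 = 1) : PySem.Int.mod x 2 = 1 := by
  simp [PySem.Int.mod, Int.fmod_eq_emod, h]

theorem pvFmod_two_of_even {x : Int} (h : x % 2 = 0) : PySem.Int.mod x 2 = 0 := by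
  simp [PySem.Int.mod, Int.fmod_eq_emod, h]

-- the multiplicity (i+1)*(n-i) is even whenever n is even
theorem pvMulEven {n i : Int} (hn : n % 2 = 0) : ((i + 1) * (n - i)) % 2 = 0 := by
  rcases Int.even_or_odd i with hi | hi
  · have h2 : Even (n - i) := by
      have hne : Even n := Int.even_iff.mpr hn
      rcases hne with ⟨m, hm⟩; rcases hi with ⟨k, hk⟩; exact ⟨m - k, by omega⟩
    exact Int.even_iff.mp (h2.mul_left _)
  · have h1 : Even (i + 1) := by
      rcases hi with ⟨k, hk⟩; exact ⟨k + 1, by omega⟩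
    exact Int.even_iff.mp (h1.mul_right _)

-- when n is odd and i is even, the multiplicity is odd
theorem pvMulOdd {n i : Int} (hn : n % 2 = 1) (hi : i % 2 = 0) :
    ((i + 1) * (n - i)) % 2 = 1 := by
  have h1 : Odd (i + 1) := by
    have : Even i := Int.even_iff.mpr hi
    rcases this with ⟨k, hk⟩; exact ⟨k, by omega⟩
  have h2 : Odd (n - i) := by
    have hno : Odd n := Int.odd_iff.mpr hn
    have hie : Even i := Int.even_iff.mpr hi
    rcases hno with ⟨m, hm⟩; rcases hie with ⟨k, hk⟩; exact ⟨m - k, by omega⟩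
  exact Int.odd_iff.mp (h1.mul h2)

-- when i is odd, the multiplicity is even
theorem pvMulOddIdx {n i : Int} (hi : i % 2 = 1) : ((i + 1) * (n - i)) % 2 = 0 := by
  have h1 : Even (i + 1) := by
    have : Odd i := Int.odd_iff.mpr hi
    rcases this with ⟨k, hk⟩; exact ⟨k + 1, by omega⟩
  exact Int.even_iff.mp (h1.mul_right _)

-- a fold that conditionally XORs is the plain XOR-fold of the filtered projected list
theorem pvFoldlIfFilter {β : Type} (c : β → Bool) (g : β → Int) :
    ∀ (l : List β) (acc : Int),
      l.foldl (fun r p => if c p then PySem.Int.bxor r (g p) else r) acc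
        = ((l.filter c).map g).foldl PySem.Int.bxor acc := by
  intro l
  induction l with
  | nil => intro acc; simp
  | cons p l ih =>
      intro acc
      by_cases h : c p = true
      · simp [h, ih]
      · simp only [Bool.not_eq_true] at h
        simp [h, ih]

-- A's stride-2 index list reads off exactly the even-indexed elements
theorem pvAList (arr : List Int) :
    (List.range ((arr.length + 1) / 2)).map
      (fun (k : ℕ) => PySem.List.pyGetD arr (2 * (k : Int)) 0) = pvEvens arr := by
  induction arr using pvEvens.induct with
  | case1 => simp [pvEvens]
  | case2 a => simp [pvEvens, PySem.List.pyGetD_zero_cons]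
  | case3 a b t ih =>
      have hlen : ((a :: b :: t).length + 1) / 2 = (t.length + 1) / 2 + 1 := by simp; omega
      rw [hlen, List.range_succ_eq_map, List.map_cons, List.map_map]
      have h0 : PySem.List.pyGetD (a :: b :: t) (2 * ((0 : ℕ) : Int)) 0 = a := by
        norm_num [PySem.List.pyGetD_zero_cons]
      rw [h0]
      have hshift : ∀ k : ℕ,
          PySem.List.pyGetD (a :: b :: t) (2 * ((k + 1 : ℕ) : Int)) 0
            = PySem.List.pyGetD t (2 * (k : Int)) 0 := by
        intro k
        have h2 : (2 * ((k + 1 : ℕ) : Int)) = ((2 * k + 2 : ℕ) : Int) := by push_cast; ring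
        have h3 : (2 * ((k : ℕ) : Int)) = ((2 * k : ℕ) : Int) := by push_cast; ring
        rw [h2, h3, PySem.List.pyGetD_natCast, PySem.List.pyGetD_natCast]
        simp
      have : (List.range ((t.length + 1) / 2)).map
          ((fun (k : ℕ) => PySem.List.pyGetD (a :: b :: t) (2 * (k : Int)) 0) ∘ Nat.succ)
          = (List.range ((t.length + 1) / 2)).map
            (fun (k : ℕ) => PySem.List.pyGetD t (2 * (k : Int)) 0) := by
        apply List.map_congr_left
        intro k _
        simpa using hshift k
      rw [this, ih, pvEvens]

-- B's filtered enumeration, for odd total length and an even offset, is the even-indexed suffix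
theorem pvBListOdd (n : Int) (hn : n % 2 = 1) :
    ∀ (t : List Int) (s : Int), s % 2 = 0 →
      ((PySem.List.enumerate t s).filter
          (fun p => PySem.Int.mod ((p.1 + 1) * (n - p.1)) 2 == 1)).map (·.2) = pvEvens t := by
  intro t
  induction t using pvEvens.induct with
  | case1 => intro s _; simp [PySem.List.enumerate_nil, pvEvens]
  | case2 a =>
      intro s hs
      rw [PySem.List.enumerate_cons, PySem.List.enumerate_nil]
      simp only [List.filter_cons, List.filter_nil]
      rw [pvFmod_two_of_odd (pvMulOdd hn hs)]
      simp [pvEvens]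
  | case3 a b t ih =>
      intro s hs
      rw [PySem.List.enumerate_cons, PySem.List.enumerate_cons]
      simp only [List.filter_cons]
      rw [pvFmod_two_of_odd (pvMulOdd hn hs),
          pvFmod_two_of_even (pvMulOddIdx (n := n) (by omega))]
      simp only [beq_self_eq_true, if_true, show ((0 : Int) == 1) = false by decide,
        Bool.false_eq_true, if_false, List.map_cons]
      rw [ih (s + 1 + 1) (by omega), pvEvens]

-- B's filtered enumeration is empty when the total length is even
theorem pvBListEven (n : Int) (hn : n % 2 = 0) :
    ∀ (t : List Int) (s : Int),
      (PySem.List.enumerate t s).filter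
        (fun p => PySem.Int.mod ((p.1 + 1) * (n - p.1)) 2 == 1) = [] := by
  intro t
  induction t with
  | nil => intro s; simp [PySem.List.enumerate_nil]
  | cons a t ih =>
      intro s
      rw [PySem.List.enumerate_cons]
      simp only [List.filter_cons]
      rw [pvFmod_two_of_even (pvMulEven hn)]
      simpa using ih (s + 1)

-- B's value, in closed form
theorem pvB_eval (arr : List Int) :
    sansaXor_alt arr = if (arr.length : Int) % 2 = 0 then 0
      else (pvEvens arr).foldl PySem.Int.bxor 0 := by
  unfold sansaXor_alt
  simp only []
  rw [pvFoldlIfFilter]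
  by_cases h : (arr.length : Int) % 2 = 0
  · rw [if_pos h, pvBListEven _ h arr 0]
    simp
  · have h1 : (arr.length : Int) % 2 = 1 := by omega
    rw [if_neg h, pvBListOdd _ h1 arr 0 (by decide)]

-- ===== VERDICT (by name: the statement is the Claim_ definition above) =====
theorem sansaXor_spec : Claim_equal_sansaXor := by
  intro arr _
  unfold Spec_sansaXor
  rw [pvB_eval]
  unfold sansaXor
  simp only []
  by_cases h : (arr.length : Int) % 2 = 0
  · rw [pvFmod_two_of_even h, if_pos h]
    simp
  · have h1 : (arr.length : Int) % 2 = 1 := by omega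
    rw [pvFmod_two_of_odd h1, if_neg h,
      show ((1 : Int) == 0) = false by decide]
    simp only [Bool.false_eq_true, if_false]
    rw [PySem.List.pyRange_of_pos 0 (arr.length : Int) (by norm_num)]
    have hpos : (0:Int) < (arr.length : Int) := by omega
    rw [if_pos hpos]
    have hcnt : (((arr.length : Int) - 0 + 2 - 1) / 2).toNat = (arr.length + 1) / 2 := by omega
    rw [hcnt, List.foldl_map, ← pvAList arr, List.foldl_map]
    apply List.foldl_ext
    intro r k _
    norm_num
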